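-- pv_equiv track=rewrite | github.com/Boomehx/trafficMISBP | conflictsUtils.py | exitLanes
-- ===== SOURCE A (Python) =====
-- def exitLanes(route, lanes):
--     ent, ext = route
--     exits = [ext]
--     currentLane = ext
--     while currentLane != ent:
--         currentLane = (currentLane + 1) % lanes
--         exits.append(currentLane)
--     return exits
-- ===== SOURCE B (Python) =====
-- def exitLanes(route, lanes):
--     ent, ext = route
--     if ext == ent:
--         return [ext]
--     steps = (ent - ext) % lanes
--     return [ext] + [(ext + i) % lanes for i in range(1, steps + 1)]
-- ===== Notes on version B (the rewrite author's own statement) =====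
-- stated objective: simpler
-- what changed: B computes the number of cyclic steps from exit to entry in closed form, steps = (ent - ext) % lanes, and builds the list positionally, instead of A's while loop that walks lane by lane until it hits the entry; Pre_ restricts lanes to a positive lane count with a valid entry lane (when ext != ent), the natural domain -- elsewhere A raises ZeroDivisionError or loops forever except on degenerate negative lane counts.
-- intended difference: When ext != ent but ext is congruent to ent modulo lanes (an out-of-range exit alias of the entry lane), A's do-while walks a full extra cycle and returns lanes+1 lanes, while B returns [ext]: the exit already is the entry lane, so zero steps is the intended answer. — e.g. on exitLanes((1, 6), 5): A returns [6, 2, 3, 4, 0, 1], B returns [6]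
-- outside the precondition, e.g. on exitLanes((-1, -3), -5): A returns [-3, -2, -1], B returns [-3]
import Mathlib
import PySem

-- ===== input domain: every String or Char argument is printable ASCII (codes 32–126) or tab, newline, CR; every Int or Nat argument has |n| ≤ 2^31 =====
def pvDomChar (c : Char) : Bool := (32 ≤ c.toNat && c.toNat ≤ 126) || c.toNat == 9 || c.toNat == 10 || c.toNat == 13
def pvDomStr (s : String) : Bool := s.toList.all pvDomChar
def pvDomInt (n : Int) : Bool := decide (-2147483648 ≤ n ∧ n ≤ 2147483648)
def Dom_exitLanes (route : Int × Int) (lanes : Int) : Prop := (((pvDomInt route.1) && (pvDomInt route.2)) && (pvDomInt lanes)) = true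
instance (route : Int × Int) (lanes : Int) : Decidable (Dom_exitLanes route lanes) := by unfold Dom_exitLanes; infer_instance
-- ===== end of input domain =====

-- B replaces A's lane-by-lane while loop with a closed-form step count (ent-ext) % lanes and a positional list build (objective: simpler); on exit lanes that alias the entry lane modulo lanes, A returns a full extra cycle and B returns just [ext] (see D_).


-- ===== PORT A =====
-- A's while loop, made total with a fuel argument; on every input admitted by
-- Pre_exitLanes the loop terminates within lanes + 1 iterations, so the fuel
-- never runs out there.
def exitLanesLoop (ent lanes : Int) : Nat → Int → List Int → List Int
  | 0, _, exits => exits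
  | fuel + 1, currentLane, exits =>
    if currentLane ≠ ent then
      let c := PySem.Int.mod (currentLane + 1) lanes
      exitLanesLoop ent lanes fuel c (exits ++ [c])
    else exits

def exitLanes (route : Int × Int) (lanes : Int) : List Int :=
  let ent := route.1
  let ext := route.2
  exitLanesLoop ent lanes (lanes.natAbs + 1) ext [ext]

-- ===== PORT B =====
def exitLanes_alt (route : Int × Int) (lanes : Int) : List Int :=
  let ent := route.1
  let ext := route.2
  if ext = ent then [ext]
  else
    let steps := PySem.Int.mod (ent - ext) lanes
    [ext] ++ (PySem.List.pyRange 1 (steps + 1) 1).map (fun i => PySem.Int.mod (ext + i) lanes)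

-- ===== PRECONDITION & SPEC =====
-- Pre_ restricts to the natural domain: either the exit already is the entry, or
-- lanes is a positive lane count and the entry lane is a valid lane index in
-- [0, lanes).  Outside it A raises ZeroDivisionError (lanes == 0 with ext != ent)
-- or loops forever (entry not a residue modulo lanes), except for negative lane
-- counts with the entry in (lanes, 0], a degenerate mirror of the real domain that
-- A happens to walk through and that is excluded as outside the task's domain.
def Pre_exitLanes (route : Int × Int) (lanes : Int) : Prop :=
  route.2 = route.1 ∨ (0 < lanes ∧ 0 ≤ route.1 ∧ route.1 < lanes)
instance (route : Int × Int) (lanes : Int) : Decidable (Pre_exitLanes route lanes) := by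
  unfold Pre_exitLanes; infer_instance
def pvWitness_exitLanes : (Int × Int) × Int := ((1, 4), 5)
-- When ext ≠ ent but ext ≡ ent (mod lanes) — an out-of-range exit alias of the entry
-- lane — A's do-while walks a full extra cycle and returns lanes+1 lanes, while B
-- returns [ext]: the exit already is the entry lane, so zero steps is the intended answer.
def D_exitLanes (route : Int × Int) (lanes : Int) : Prop :=
  route.2 ≠ route.1 ∧ lanes ∣ (route.2 - route.1)
instance (route : Int × Int) (lanes : Int) : Decidable (D_exitLanes route lanes) := by
  unfold D_exitLanes; infer_instance
def Spec_exitLanes (route : Int × Int) (lanes : Int) (out : List Int) : Prop :=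
  ¬ D_exitLanes route lanes → out = exitLanes_alt route lanes
instance (route : Int × Int) (lanes : Int) (out : List Int) : Decidable (Spec_exitLanes route lanes out) := by unfold Spec_exitLanes; infer_instance
def pvDiffWitness_exitLanes : (Int × Int) × Int := ((1, 6), 5)
def pvDiffWitnessOut_exitLanes : (List Int) × (List Int) := ([6, 2, 3, 4, 0, 1], [6])

-- ===== CLAIM (what is proved, stated in full; the proofs are below) =====
def Claim_unchanged_exitLanes : Prop := ∀ (route : Int × Int) (lanes : Int), Dom_exitLanes route lanes → Pre_exitLanes route lanes → Spec_exitLanes route lanes (exitLanes route lanes)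
def Claim_changed_exitLanes : Prop := Dom_exitLanes (pvDiffWitness_exitLanes.1) (pvDiffWitness_exitLanes.2) ∧ Pre_exitLanes (pvDiffWitness_exitLanes.1) (pvDiffWitness_exitLanes.2) ∧ D_exitLanes (pvDiffWitness_exitLanes.1) (pvDiffWitness_exitLanes.2) ∧ exitLanes (pvDiffWitness_exitLanes.1) (pvDiffWitness_exitLanes.2) = pvDiffWitnessOut_exitLanes.1 ∧ exitLanes_alt (pvDiffWitness_exitLanes.1) (pvDiffWitness_exitLanes.2) = pvDiffWitnessOut_exitLanes.2 ∧ pvDiffWitnessOut_exitLanes.1 ≠ pvDiffWitnessOut_exitLanes.2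
def Claim_exact_exitLanes : Prop := ∀ (route : Int × Int) (lanes : Int), Dom_exitLanes route lanes → Pre_exitLanes route lanes → D_exitLanes route lanes → exitLanes route lanes ≠ exitLanes_alt route lanes

-- ===== LEMMAS AND PROOFS =====

-- Python's % leaves residues unchanged: if r is already in [0, l) and l divides
-- x - r, then x % l = r.
lemma pymod_eq_of_dvd_of_range {x r l : Int}
    (hd : l ∣ (x - r)) (hl : 0 < l) (h0 : 0 ≤ r) (h1 : r < l) :
    PySem.Int.mod x l = r := by
  have hx := PySem.Int.floordiv_mul_add_mod x l
  have hd2 : l ∣ (PySem.Int.mod x l - r) := by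
    have h : PySem.Int.mod x l - r = (x - r) - PySem.Int.floordiv x l * l := by linarith
    rw [h]
    exact dvd_sub hd (Dvd.intro_left _ rfl)
  have hz : PySem.Int.mod x l - r = 0 := by
    apply Int.eq_zero_of_dvd_of_natAbs_lt_natAbs hd2
    have b0 := PySem.Int.mod_nonneg x hl
    have b1 := PySem.Int.mod_lt x hl
    omega
  linarith

-- x % l is congruent to x modulo l.
lemma pymod_dvd_sub (x l : Int) : l ∣ (x - PySem.Int.mod x l) := by
  have hx := PySem.Int.floordiv_mul_add_mod x l
  have h : x - PySem.Int.mod x l = PySem.Int.floordiv x l * l := by linarith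
  rw [h]
  exact dvd_mul_left l _

-- The loop, read off: starting from a lane congruent to ext + j with j < s
-- (s the first positive hit of ent), it appends (ext+(j+1)) % lanes, …,
-- (ext+s) % lanes and stops.
lemma exitLanesLoop_eq (ent ext lanes s : Int) (hl : 0 < lanes)
    (hs_hit : PySem.Int.mod (ext + s) lanes = ent)
    (hs_min : ∀ k : Int, 1 ≤ k → k < s → PySem.Int.mod (ext + k) lanes ≠ ent) :
    ∀ (fuel j : Nat) (cur : Int) (acc : List Int),
      (j : Int) < s → s ≤ (j : Int) + (fuel : Int) →
      lanes ∣ (cur - (ext + j)) → cur ≠ ent →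
      exitLanesLoop ent lanes fuel cur acc =
        acc ++ (PySem.List.pyRange ((j : Int) + 1) (s + 1) 1).map
          (fun i => PySem.Int.mod (ext + i) lanes) := by
  intro fuel
  induction fuel with
  | zero => intro j cur acc hj hfu _ _; exfalso; omega
  | succ fu ih =>
    intro j cur acc hj hfu hdvd hcur
    show exitLanesLoop ent lanes (fu + 1) cur acc = _
    rw [exitLanesLoop, if_pos hcur]
    have hlne : lanes ≠ 0 := by omega
    have hc : PySem.Int.mod (cur + 1) lanes = PySem.Int.mod (ext + ((j : Int) + 1)) lanes := by
      have hd : lanes ∣ ((cur + 1) - PySem.Int.mod (ext + ((j : Int) + 1)) lanes) := by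
        have h2 := pymod_dvd_sub (ext + ((j : Int) + 1)) lanes
        have h : (cur + 1) - PySem.Int.mod (ext + ((j : Int) + 1)) lanes
            = (cur - (ext + (j : Int))) + ((ext + ((j : Int) + 1)) - PySem.Int.mod (ext + ((j : Int) + 1)) lanes) := by ring
        rw [h]; exact dvd_add hdvd h2
      exact pymod_eq_of_dvd_of_range hd hl
        (PySem.Int.mod_nonneg _ hl) (PySem.Int.mod_lt _ hl)
    by_cases hend : (j : Int) + 1 = s
    · -- the next lane is the entry: one final append, then the loop stops
      have hcent : PySem.Int.mod (cur + 1) lanes = ent := by rw [hc, hend]; exact hs_hit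
      have hstop : ∀ f : Nat, exitLanesLoop ent lanes f ent (acc ++ [ent]) = acc ++ [ent] := by
        intro f; cases f with
        | zero => rfl
        | succ f => rw [exitLanesLoop, if_neg (by simp)]
      have hr : PySem.List.pyRange ((j : Int) + 1) (s + 1) 1 = [(j : Int) + 1] := by
        rw [← hend]; exact PySem.List.pyRange_one_singleton ((j : Int) + 1)
      simp only [hcent, hstop, hr, List.map_cons, List.map_nil]
      rw [hend, hs_hit]
    · have hlt : (j : Int) + 1 < s := by omega
      have hne : PySem.Int.mod (cur + 1) lanes ≠ ent := by
        rw [hc]; exact hs_min _ (by omega) hlt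
      rw [ih (j + 1) _ _ (by push_cast; omega) (by push_cast; push_cast at hfu; omega)
        (by push_cast
            rw [hc]
            exact dvd_sub_comm.mp (pymod_dvd_sub (ext + ((j : Int) + 1)) lanes)) hne]
      have hcast : ((j + 1 : Nat) : Int) = (j : Int) + 1 := by push_cast; ring
      rw [hcast, List.append_assoc]
      have hr : PySem.List.pyRange ((j : Int) + 1) (s + 1) 1
          = ((j : Int) + 1) :: PySem.List.pyRange ((j : Int) + 1 + 1) (s + 1) 1 :=
        PySem.List.pyRange_one_cons (by omega)
      rw [hr]
      simp [hc]

-- Inside Pre_ with ext ≠ ent, A's result is [ext] followed by the lanes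
-- (ext+1)%lanes, …, (ext+s)%lanes, where s is the first positive i with
-- (ext+i) % lanes = ent.
lemma exitLanes_eq_walk (ent ext lanes s : Int) (hl : 0 < lanes) (hext : ext ≠ ent)
    (hs1 : 1 ≤ s) (hs2 : s ≤ lanes)
    (hs_hit : PySem.Int.mod (ext + s) lanes = ent)
    (hs_min : ∀ k : Int, 1 ≤ k → k < s → PySem.Int.mod (ext + k) lanes ≠ ent) :
    exitLanes (ent, ext) lanes =
      [ext] ++ (PySem.List.pyRange 1 (s + 1) 1).map (fun i => PySem.Int.mod (ext + i) lanes) := by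
  have hmain := exitLanesLoop_eq ent ext lanes s hl hs_hit hs_min
    (lanes.natAbs + 1) 0 ext [ext] (by omega)
    (by omega)
    (by simp) hext
  simpa [exitLanes] using hmain

-- ===== VERDICT (by name: the statements are the Claim_ definitions above) =====
theorem exitLanes_spec : Claim_unchanged_exitLanes := by
  intro route lanes _ hpre hD
  obtain ⟨ent, ext⟩ := route
  unfold exitLanes_alt
  by_cases hext : ext = ent
  · subst hext
    rw [if_pos rfl]
    show exitLanesLoop ext lanes (lanes.natAbs + 1) ext [ext] = [ext]
    rw [exitLanesLoop, if_neg (by simp)]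
  · have hrange : 0 < lanes ∧ 0 ≤ ent ∧ ent < lanes := by
      rcases hpre with h | h
      · exact absurd h hext
      · exact h
    obtain ⟨hl, h0, h1⟩ := hrange
    have hnd : ¬ lanes ∣ (ext - ent) := by
      intro h; exact hD ⟨hext, h⟩
    set s : Int := PySem.Int.mod (ent - ext) lanes with hs_def
    have hs0 : 0 ≤ s := PySem.Int.mod_nonneg _ hl
    have hslt : s < lanes := PySem.Int.mod_lt _ hl
    have hds : lanes ∣ ((ent - ext) - s) := pymod_dvd_sub (ent - ext) lanes
    have hs1 : 1 ≤ s := by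
      rcases Int.lt_or_le 0 s with h | h
      · omega
      · exfalso
        have hs_eq : s = 0 := by omega
        apply hnd
        have h2 : ext - ent = -((ent - ext) - s) + -s := by ring
        rw [h2]
        exact dvd_add (dvd_neg.mpr hds) (by rw [hs_eq]; exact dvd_zero lanes)
    have hdvds : lanes ∣ (ext + s - ent) := by
      have h : ext + s - ent = -((ent - ext) - s) := by ring
      rw [h]; exact dvd_neg.mpr hds
    have hs_hit : PySem.Int.mod (ext + s) lanes = ent :=
      pymod_eq_of_dvd_of_range hdvds hl h0 h1
    have hs_min : ∀ k : Int, 1 ≤ k → k < s → PySem.Int.mod (ext + k) lanes ≠ ent := by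
      intro k hk1 hk2 heq
      have hdk : lanes ∣ (ext + k - ent) := by
        have := pymod_dvd_sub (ext + k) lanes
        rw [heq] at this; exact this
      have hsk : lanes ∣ (s - k) := by
        have h : s - k = (ext + s - ent) - (ext + k - ent) := by ring
        rw [h]; exact dvd_sub hdvds hdk
      have h1 : 0 < s - k := by omega
      have hle := Int.le_of_dvd h1 hsk
      omega
    rw [if_neg hext]
    exact exitLanes_eq_walk ent ext lanes s hl hext hs1 (by omega) hs_hit hs_min

theorem exitLanes_changed : Claim_changed_exitLanes := by
  unfold Claim_changed_exitLanes; decide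

theorem exitLanes_tight : Claim_exact_exitLanes := by
  intro route lanes _ hpre hD
  obtain ⟨ent, ext⟩ := route
  obtain ⟨hext, hdvd⟩ := hD
  simp only [] at hext hdvd
  have hl : 0 < lanes := by
    rcases hpre with h | h
    · exact absurd h hext
    · exact h.1
  have hrange : 0 ≤ ent ∧ ent < lanes := by
    rcases hpre with h | h
    · exact absurd h hext
    · exact ⟨h.2.1, h.2.2⟩
  -- A walks a full cycle of length lanes
  have hs_hit : PySem.Int.mod (ext + lanes) lanes = ent := by
    apply pymod_eq_of_dvd_of_range _ hl hrange.1 hrange.2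
    have h : ext + lanes - ent = (ext - ent) + lanes := by ring
    rw [h]; exact dvd_add hdvd (dvd_refl lanes)
  have hs_min : ∀ k : Int, 1 ≤ k → k < lanes → PySem.Int.mod (ext + k) lanes ≠ ent := by
    intro k hk1 hk2 heq
    have hdk : lanes ∣ (ext + k - ent) := by
      have := pymod_dvd_sub (ext + k) lanes
      rw [heq] at this; exact this
    have hkk : lanes ∣ k := by
      have h : k = (ext + k - ent) - (ext - ent) := by ring
      rw [h]; exact dvd_sub hdk hdvd
    have hle := Int.le_of_dvd (by omega) hkk
    omega
  have hA := exitLanes_eq_walk ent ext lanes lanes hl hext (by omega) (le_refl _) hs_hit hs_min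
  -- B returns [ext] since (ent - ext) % lanes = 0
  have hmod0 : PySem.Int.mod (ent - ext) lanes = 0 := by
    apply pymod_eq_of_dvd_of_range _ hl (le_refl 0) hl
    have h : ent - ext - 0 = -(ext - ent) := by ring
    rw [h]; exact dvd_neg.mpr hdvd
  have hB : exitLanes_alt (ent, ext) lanes = [ext] := by
    unfold exitLanes_alt
    rw [if_neg hext]
    simp [hmod0]
  rw [hA, hB]
  have hr : PySem.List.pyRange 1 (lanes + 1) 1
      = 1 :: PySem.List.pyRange 2 (lanes + 1) 1 := PySem.List.pyRange_one_cons (by omega)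
  rw [hr]
  simp
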